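-- pv_equiv track=rewrite | github.com/dh0728/ssafy_study | song_algorithm/09_26/1292_쉽게푸는문제.py | make_arr
-- ===== SOURCE A (Python) =====
-- def make_arr(N):  #N:수열의 길이
--     num_arr=[]
--     cnt=0
--     curr_num=1
--     for i in range(N):
--         if cnt==curr_num: # 숫자를 숫자번 넣었으면
--             cnt=0 # 넣은 횟수 초기화
--             curr_num+=1 # 다음 숫자로 넘어가기
--         num_arr.append(curr_num)
--         cnt+=1
--     return num_arr
-- ===== SOURCE B (Python) =====
-- def make_arr(N):
--     result = []
--     v = 1
--     while len(result) < N: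
--         result.extend([v] * min(v, N - len(result)))
--         v += 1
--     return result
-- ===== Notes on version B (the rewrite author's own statement) =====
-- stated objective: faster
-- what changed: B builds the sequence run by run (extend with min(v, N-len) copies of v per outer step, O(sqrt N) Python-level iterations) instead of A's flat element-at-a-time loop with a reset counter.
import Mathlib
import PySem

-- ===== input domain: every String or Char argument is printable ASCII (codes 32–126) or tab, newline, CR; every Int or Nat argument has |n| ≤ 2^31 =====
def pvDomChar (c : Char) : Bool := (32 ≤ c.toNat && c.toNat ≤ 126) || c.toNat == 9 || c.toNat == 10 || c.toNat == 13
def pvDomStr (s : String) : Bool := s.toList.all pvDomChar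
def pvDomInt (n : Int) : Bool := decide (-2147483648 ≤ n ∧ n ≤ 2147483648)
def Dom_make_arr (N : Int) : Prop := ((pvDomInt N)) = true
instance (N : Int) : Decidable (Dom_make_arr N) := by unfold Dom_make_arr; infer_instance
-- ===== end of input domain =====

-- B builds the sequence run by run (blocks of v copies of v) instead of A's flat per-element loop with a reset counter.

-- ===== PORT A =====
-- state: (num_arr, cnt, curr_num); one foldl step per loop iteration of A
def make_arr_step (s : List Int × Int × Int) (_ : Int) : List Int × Int × Int :=
  let (arr, cnt, curr) := s
  let (cnt, curr) := if cnt = curr then ((0 : Int), curr + 1) else (cnt, curr)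
  (arr ++ [curr], cnt + 1, curr)

def make_arr (N : Int) : List Int :=
  ((PySem.List.pyRange 0 N 1).foldl make_arr_step ([], 0, 1)).1

-- ===== PORT B =====
-- while len(result) < N: result.extend([v]*min(v, N-len(result))); v += 1
-- recursion on rem = N - len(result); v carries the invariant 1 ≤ v needed for termination
def make_arr_alt_go : (rem : Nat) → (v : Nat) → 1 ≤ v → List Int
  | 0, _, _ => []
  | rem + 1, v, hv =>
    List.replicate (min v (rem + 1)) (v : Int) ++
      make_arr_alt_go (rem + 1 - min v (rem + 1)) (v + 1) (by omega)
  termination_by rem _ _ => rem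
  decreasing_by omega

def make_arr_alt (N : Int) : List Int := make_arr_alt_go N.toNat 1 (by omega)

-- ===== PRECONDITION & SPEC =====
def Spec_make_arr (N : Int) (out : List Int) : Prop := out = make_arr_alt N
instance (N : Int) (out : List Int) : Decidable (Spec_make_arr N out) := by unfold Spec_make_arr; infer_instance

-- ===== CLAIM (what is proved, stated in full; the proofs are below) =====
def Claim_equal_make_arr : Prop := ∀ (N : Int), Dom_make_arr N → Spec_make_arr N (make_arr N)

-- ===== LEMMAS AND PROOFS =====

-- A's loop, state machine form: n remaining iterations from state (cnt, curr)
def aGo : Nat → Int → Int → List Int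
  | 0, _, _ => []
  | n + 1, cnt, curr =>
    if cnt = curr then (curr + 1) :: aGo n 1 (curr + 1) else curr :: aGo n (cnt + 1) curr

theorem foldl_step_eq_aGo (l : List Int) :
    ∀ (arr : List Int) (cnt curr : Int),
      (l.foldl make_arr_step (arr, cnt, curr)).1 = arr ++ aGo l.length cnt curr := by
  induction l with
  | nil => intro arr cnt curr; simp [aGo]
  | cons x xs ih =>
    intro arr cnt curr
    simp only [List.foldl_cons, make_arr_step, List.length_cons]
    by_cases h : cnt = curr
    · simp [h, aGo, ih]
    · simp [h, aGo, ih]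

-- running a partial block: gap m = curr - cnt copies of curr remain to be appended
theorem aGo_run (m : Nat) : ∀ (n : Nat) (cnt curr : Int), curr = cnt + m →
    aGo n cnt curr = List.replicate (min m n) curr ++ aGo (n - min m n) curr curr := by
  induction m with
  | zero => intro n cnt curr h; simp at h; simp [h]
  | succ m ih =>
    intro n cnt curr h
    cases n with
    | zero => simp [aGo]
    | succ k =>
      have hne : cnt ≠ curr := by omega
      have : aGo (k + 1) cnt curr = curr :: aGo k (cnt + 1) curr := by
        simp [aGo, hne]
      rw [this, ih k (cnt + 1) curr (by omega)]
      have hmin : min (m + 1 : Nat) (k + 1) = min m k + 1 := by omega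
      rw [hmin]
      simp [List.replicate_succ]

-- finishing a block and starting the next value are the same state
theorem aGo_reset (k : Nat) (curr : Int) (h : 0 ≤ curr) :
    aGo k curr curr = aGo k 0 (curr + 1) := by
  cases k with
  | zero => rfl
  | succ n =>
    have h0 : (0 : Int) ≠ curr + 1 := by omega
    simp [aGo, h0]

theorem aGo_eq_bGo (n : Nat) : ∀ (v : Nat) (hv : 1 ≤ v),
    aGo n 0 (v : Int) = make_arr_alt_go n v hv := by
  induction n using Nat.strong_induction_on with
  | _ n ih =>
    intro v hv
    cases n with
    | zero => simp [aGo, make_arr_alt_go]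
    | succ k =>
      have hg : ((v : Int)) = 0 + (v : Nat) := by omega
      rw [aGo_run v (k + 1) 0 (v : Int) hg, aGo_reset _ _ (by positivity)]
      rw [show ((v : Int)) + 1 = ((v + 1 : Nat) : Int) by omega]
      rw [ih (k + 1 - min v (k + 1)) (by omega) (v + 1) (by omega)]
      rw [make_arr_alt_go]

-- ===== VERDICT (by name: the statement is the Claim_ definition above) =====
theorem make_arr_spec : Claim_equal_make_arr := by
  intro N _
  unfold Spec_make_arr make_arr make_arr_alt
  rw [foldl_step_eq_aGo]
  rw [PySem.List.length_pyRange_one]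
  simpa using aGo_eq_bGo (N - 0).toNat 1 (by omega)
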